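-- pv_equiv track=rewrite | github.com/upesacm/21DaysOfCode-2023 | Python/rudra_python/quiz1code3.py | is_triplet_exists
-- ===== SOURCE A (Python) =====
-- def is_triplet_exists(a, b, c):
--   """
--   Returns True if there exists a triplet (x, y, z) such that x is divisible by a, y is divisible by b, z is divisible by c, and x + y > z. Otherwise, returns False.
--
--   Args:
--     a: The first integer.
--     b: The second integer.
--     c: The third integer.
--
--   Returns:
--     True if there exists a triplet satisfying the conditions, False otherwise.
--   """
--
--   for x in range(1, c + 1):
--     if x % a == 0:
--       for y in range(1, c + 1):
--         if y % b == 0: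
--           if x + y > c:
--             return True
--   return False
-- ===== SOURCE B (Python) =====
-- def is_triplet_exists(a, b, c):
--     # O(1): the best candidates are the largest multiples of |a| and |b| not exceeding c.
--     if c <= 0:
--         return False
--     x = (c // abs(a)) * abs(a)   # largest multiple of |a| in [1, c] (0 if none)
--     if x == 0:
--         return False
--     y = (c // abs(b)) * abs(b)   # largest multiple of |b| in [1, c] (0 if none)
--     return x + y > c
-- ===== Notes on version B (the rewrite author's own statement) =====
-- stated objective: faster
-- what changed: Replaced the nested O(c^2) scan over all x,y in [1,c] by a closed-form O(1) check using the largest multiples of |a| and |b| not exceeding c.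
import Mathlib
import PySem

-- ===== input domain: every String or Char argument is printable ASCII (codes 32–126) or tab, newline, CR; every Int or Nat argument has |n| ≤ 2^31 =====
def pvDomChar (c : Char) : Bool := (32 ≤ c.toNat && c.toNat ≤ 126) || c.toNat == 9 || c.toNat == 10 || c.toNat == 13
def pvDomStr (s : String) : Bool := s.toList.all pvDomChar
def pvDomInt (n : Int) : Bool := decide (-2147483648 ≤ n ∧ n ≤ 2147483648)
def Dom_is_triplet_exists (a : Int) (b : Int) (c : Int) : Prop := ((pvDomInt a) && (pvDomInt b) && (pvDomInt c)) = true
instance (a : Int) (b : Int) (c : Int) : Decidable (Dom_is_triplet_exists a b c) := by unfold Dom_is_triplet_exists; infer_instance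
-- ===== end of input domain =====

-- B replaces A's nested O(c^2) scan by an O(1) closed form over the largest multiples of |a|,|b| ≤ c.

-- ===== PORT A =====
-- nested for-loops with early 'return True' transliterated as List.any over range(1, c+1)
def is_triplet_exists (a : Int) (b : Int) (c : Int) : Bool :=
  (PySem.List.pyRange 1 (c + 1) 1).any (fun x =>
    PySem.Int.mod x a == 0 &&
      (PySem.List.pyRange 1 (c + 1) 1).any (fun y =>
        PySem.Int.mod y b == 0 && decide (x + y > c)))

-- ===== PORT B =====
def is_triplet_exists_alt (a : Int) (b : Int) (c : Int) : Bool :=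
  if c ≤ 0 then false
  else
    let x := PySem.Int.floordiv c |a| * |a|
    if x == 0 then false
    else
      let y := PySem.Int.floordiv c |b| * |b|
      decide (x + y > c)

-- ===== PRECONDITION & SPEC =====
-- Pre_ excludes exactly the inputs where A raises ZeroDivisionError (a = 0 with c ≥ 1,
-- or b = 0 with a multiple of a in [1,c]); B raises on exactly the same inputs.
def Pre_is_triplet_exists (a : Int) (b : Int) (c : Int) : Prop :=
  c ≤ 0 ∨ (a ≠ 0 ∧ (b ≠ 0 ∨ c < |a|))
instance (a : Int) (b : Int) (c : Int) : Decidable (Pre_is_triplet_exists a b c) := by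
  unfold Pre_is_triplet_exists; infer_instance

def pvWitness_is_triplet_exists : Int × Int × Int := (2, 3, 10)

def Spec_is_triplet_exists (a : Int) (b : Int) (c : Int) (out : Bool) : Prop :=
  out = is_triplet_exists_alt a b c
instance (a : Int) (b : Int) (c : Int) (out : Bool) : Decidable (Spec_is_triplet_exists a b c out) := by
  unfold Spec_is_triplet_exists; infer_instance

-- ===== CLAIM (what is proved, stated in full; the proofs are below) =====
def Claim_equal_is_triplet_exists : Prop := ∀ (a : Int) (b : Int) (c : Int), Dom_is_triplet_exists a b c → Pre_is_triplet_exists a b c → Spec_is_triplet_exists a b c (is_triplet_exists a b c)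

-- ===== LEMMAS AND PROOFS =====

-- A's outer/inner test as an existential
lemma a_eq_true_iff (a b c : Int) :
    is_triplet_exists a b c = true ↔
      ∃ x, (1 ≤ x ∧ x ≤ c) ∧ PySem.Int.mod x a = 0 ∧
        ∃ y, (1 ≤ y ∧ y ≤ c) ∧ PySem.Int.mod y b = 0 ∧ x + y > c := by
  simp only [is_triplet_exists, List.any_eq_true, PySem.List.mem_pyRange_one,
    Bool.and_eq_true, beq_iff_eq, decide_eq_true_eq]
  constructor
  · rintro ⟨x, ⟨hx1, hx2⟩, hxa, y, ⟨hy1, hy2⟩, hyb, hxy⟩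
    exact ⟨x, ⟨hx1, by omega⟩, hxa, y, ⟨hy1, by omega⟩, hyb, hxy⟩
  · rintro ⟨x, ⟨hx1, hx2⟩, hxa, y, ⟨hy1, hy2⟩, hyb, hxy⟩
    exact ⟨x, ⟨hx1, by omega⟩, ⟨hxa, y, ⟨hy1, by omega⟩, hyb, hxy⟩⟩

-- the largest multiple of d (0 < d) not exceeding c bounds every multiple in [1,c]
lemma mult_le_best {d x c : Int} (hd : 0 < d) (hdx : d ∣ x) (hxc : x ≤ c) :
    x ≤ PySem.Int.floordiv c d * d := by
  rw [PySem.Int.floordiv_eq_ediv_of_pos hd]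
  obtain ⟨k, rfl⟩ := hdx
  have : k ≤ c / d := (Int.le_ediv_iff_mul_le hd).2 (by linarith [mul_comm d k])
  calc d * k = k * d := mul_comm d k
    _ ≤ c / d * d := by exact mul_le_mul_of_nonneg_right this (le_of_lt hd)

lemma best_dvd (d c : Int) : d ∣ PySem.Int.floordiv c d * d := dvd_mul_left d _

lemma best_le {d c : Int} (hd : 0 < d) : PySem.Int.floordiv c d * d ≤ c := by
  rw [PySem.Int.floordiv_eq_ediv_of_pos hd]
  exact Int.ediv_mul_le c (ne_of_gt hd)

lemma best_pos {d c : Int} (hd : 0 < d) (hdc : d ≤ c) :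
    d ≤ PySem.Int.floordiv c d * d := mult_le_best hd dvd_rfl hdc

lemma best_zero {d c : Int} (hd : 0 < d) (hc : 0 ≤ c) (hdc : c < d) :
    PySem.Int.floordiv c d * d = 0 := by
  rw [PySem.Int.floordiv_eq_ediv_of_pos hd, Int.ediv_eq_zero_of_lt hc hdc, zero_mul]

lemma mod_abs_eq_zero_iff {x d : Int} :
    PySem.Int.mod x d = 0 ↔ |d| ∣ x := by
  rw [PySem.Int.mod_eq_zero_iff_dvd, abs_dvd]

-- ===== VERDICT (by name: the statement is the Claim_ definition above) =====
theorem is_triplet_exists_spec : Claim_equal_is_triplet_exists := by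
  intro a b c _ hpre
  unfold Spec_is_triplet_exists
  by_cases hc : c ≤ 0
  · -- empty range on A's side, first branch on B's
    have : PySem.List.pyRange 1 (c + 1) 1 = [] :=
      PySem.List.pyRange_one_eq_nil (by omega)
    simp [is_triplet_exists, is_triplet_exists_alt, this, hc]
  · push Not at hc
    have ha : a ≠ 0 := by
      rcases hpre with h | ⟨ha, _⟩; · omega
      · exact ha
    have hA0 : 0 < |a| := abs_pos.2 ha
    by_cases hac : c < |a|
    · -- no multiple of a in [1,c]: both sides are false
      have hx0 : PySem.Int.floordiv c |a| * |a| = 0 := best_zero hA0 (by omega) hac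
      have hafalse : is_triplet_exists a b c = false := by
        rw [Bool.eq_false_iff]
        intro h
        obtain ⟨x, ⟨hx1, hx2⟩, hxa, _⟩ := (a_eq_true_iff a b c).1 h
        have := Int.le_of_dvd (by omega) ((mod_abs_eq_zero_iff).1 hxa)
        omega
      rw [hafalse]
      simp [is_triplet_exists_alt, hx0, not_le.2 hc]
    · -- |a| ≤ c, so b ≠ 0 by Pre_
      push Not at hac
      have hb : b ≠ 0 := by
        rcases hpre with h | ⟨_, hb | h⟩
        · omega
        · exact hb
        · omega
      have hB0 : 0 < |b| := abs_pos.2 hb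
      set X := PySem.Int.floordiv c |a| * |a| with hX
      set Y := PySem.Int.floordiv c |b| * |b| with hY
      have hXpos : |a| ≤ X := best_pos hA0 hac
      have hXle : X ≤ c := best_le hA0
      have hYle : Y ≤ c := best_le hB0
      have hXne : ¬ (X == 0) = true := by simp; omega
      have halt : is_triplet_exists_alt a b c = decide (X + Y > c) := by
        simp only [is_triplet_exists_alt, if_neg (not_le.2 hc), ← hX, ← hY]
        simp [hXne]
      rw [halt]
      by_cases hbig : X + Y > c
      · -- witnesses X, Y work: Y must be positive since X ≤ c
        have hYpos : 0 < Y := by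
          rcases lt_or_ge c |b| with hcb | hcb
          · have := best_zero hB0 (by omega) hcb; omega
          · have := best_pos hB0 hcb; omega
        have : is_triplet_exists a b c = true := by
          rw [a_eq_true_iff]
          exact ⟨X, ⟨by omega, hXle⟩,
            (mod_abs_eq_zero_iff).2 (best_dvd _ _), Y, ⟨by omega, hYle⟩,
            (mod_abs_eq_zero_iff).2 (best_dvd _ _), hbig⟩
        simp [this, hbig]
      · -- every candidate pair is bounded by X + Y ≤ c
        have : is_triplet_exists a b c = false := by
          rw [Bool.eq_false_iff]
          intro h
          obtain ⟨x, ⟨hx1, hx2⟩, hxa, y, ⟨hy1, hy2⟩, hyb, hxy⟩ := (a_eq_true_iff a b c).1 h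
          have h1 := mult_le_best hA0 ((mod_abs_eq_zero_iff).1 hxa) hx2
          have h2 := mult_le_best hB0 ((mod_abs_eq_zero_iff).1 hyb) hy2
          omega
        simp [this, hbig]
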